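-- pv_equiv track=rewrite | github.com/brettvitaz/mtg-scanner | services/api/app/services/mtgjson_index.py | normalize_collector_number
-- ===== SOURCE A (Python) =====
-- import unicodedata
--
-- def normalize_collector_number(value: str | None) -> str:
--     if not value:
--         return ""
--     text = unicodedata.normalize("NFKC", value).strip().lower().replace(" ", "")
--     if not text:
--         return ""
--     prefix_chars: list[str] = []
--     suffix_chars: list[str] = []
--     seen_non_digit = False
--     for char in text:
--         if char.isdigit() and not seen_non_digit:
--             prefix_chars.append(char)
--         elif char.isalnum():
--             seen_non_digit = True
--             suffix_chars.append(char)
--     if not prefix_chars and not suffix_chars: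
--         return ""
--     digits = "".join(prefix_chars).lstrip("0") or ("0" if prefix_chars else "")
--     return f"{digits}{''.join(suffix_chars)}"
-- ===== SOURCE B (Python) =====
-- import unicodedata
-- from itertools import takewhile
--
--
-- def normalize_collector_number(value: str | None) -> str:
--     if not value:
--         return ""
--     text = unicodedata.normalize("NFKC", value).strip().lower().replace(" ", "")
--     cleaned = "".join(c for c in text if c.isalnum())
--     if not cleaned:
--         return ""
--     prefix = "".join(takewhile(str.isdigit, cleaned))
--     suffix = cleaned[len(prefix):]
--     digits = prefix.lstrip("0") or ("0" if prefix else "")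
--     return f"{digits}{suffix}"
-- ===== Notes on version B (the rewrite author's own statement) =====
-- stated objective: simpler
-- what changed: Replaces the single stateful partition loop (seen_non_digit flag plus two accumulator lists) by an isalnum filter pass followed by a takewhile split into leading digit run and remainder.
import Mathlib
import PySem

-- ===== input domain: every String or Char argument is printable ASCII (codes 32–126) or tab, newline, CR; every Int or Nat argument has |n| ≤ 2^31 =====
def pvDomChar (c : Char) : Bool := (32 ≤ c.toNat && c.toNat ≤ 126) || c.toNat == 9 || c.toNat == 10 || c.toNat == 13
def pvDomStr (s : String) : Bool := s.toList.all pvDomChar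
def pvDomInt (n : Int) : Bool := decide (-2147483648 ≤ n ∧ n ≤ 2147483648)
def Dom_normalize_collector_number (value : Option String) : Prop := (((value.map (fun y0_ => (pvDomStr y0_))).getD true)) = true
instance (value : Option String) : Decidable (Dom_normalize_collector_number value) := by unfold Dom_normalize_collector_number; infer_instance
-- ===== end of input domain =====

-- B replaces A's stateful partition loop (seen_non_digit flag, two accumulators) by a
-- filter pass followed by a takewhile split of the cleaned string; same value, simpler shape.
-- unicodedata.normalize("NFKC", ·) is the identity on the ASCII domain and is therefore omitted in both ports.

-- ===== PORT A =====
-- one step of A's for-loop over (prefix_chars, suffix_chars, seen_non_digit)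
def pvStepA (st : List Char × List Char × Bool) (c : Char) : List Char × List Char × Bool :=
  if PySem.Chars.isdigit c && !st.2.2 then (st.1 ++ [c], st.2.1, st.2.2)
  else if PySem.Chars.isalnum c then (st.1, st.2.1 ++ [c], true)
  else st

-- A's code after `text` is built (loop, emptiness guard, lstrip("0"), f-string)
def pvBodyA (cs : List Char) : String :=
  let st := cs.foldl pvStepA ([], [], false)
  let prefix_chars := st.1
  let suffix_chars := st.2.1
  if prefix_chars = [] ∧ suffix_chars = [] then "" else
  -- `.lstrip("0")` ported by hand as dropWhile (· == '0'): exact for a single-char strip set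
  let stripped := prefix_chars.dropWhile (· == '0')
  let digits := if stripped = [] then (if prefix_chars = [] then [] else ['0']) else stripped
  String.mk (digits ++ suffix_chars)

def normalize_collector_number (value : Option String) : String :=
  match value with
  | none => ""
  | some v =>
    if v = "" then "" else
    -- text = NFKC(v).strip().lower().replace(" ", "")   (NFKC = identity on ASCII)
    if PySem.Str.replace (PySem.Str.lower (PySem.Str.strip v)) " " "" = "" then ""
    else pvBodyA (PySem.Str.replace (PySem.Str.lower (PySem.Str.strip v)) " " "").toList

-- ===== PORT B =====
-- B's code after `text` is built: filter, then takewhile split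
def pvBodyB (cs : List Char) : String :=
  let cleaned := cs.filter PySem.Chars.isalnum
  if cleaned = [] then "" else
  let pre := cleaned.takeWhile PySem.Chars.isdigit
  let suffix := cleaned.drop pre.length   -- cleaned[len(prefix):]
  -- `.lstrip("0")` ported by hand as dropWhile (· == '0'): exact for a single-char strip set
  let stripped := pre.dropWhile (· == '0')
  let digits := if stripped = [] then (if pre = [] then [] else ['0']) else stripped
  String.mk (digits ++ suffix)

def normalize_collector_number_alt (value : Option String) : String :=
  match value with
  | none => ""
  | some v =>
    if v = "" then "" else
    -- text = NFKC(v).strip().lower().replace(" ", "")   (NFKC = identity on ASCII)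
    pvBodyB (PySem.Str.replace (PySem.Str.lower (PySem.Str.strip v)) " " "").toList

-- ===== PRECONDITION & SPEC =====
def Spec_normalize_collector_number (value : Option String) (out : String) : Prop := out = normalize_collector_number_alt value
instance (value : Option String) (out : String) : Decidable (Spec_normalize_collector_number value out) := by unfold Spec_normalize_collector_number; infer_instance

-- ===== CLAIM (what is proved, stated in full; the proofs are below) =====
def Claim_equal_normalize_collector_number : Prop := ∀ (value : Option String), Dom_normalize_collector_number value → Spec_normalize_collector_number value (normalize_collector_number value)

-- ===== LEMMAS AND PROOFS =====

theorem isalnum_of_isdigit {c : Char} (h : PySem.Chars.isdigit c = true) :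
    PySem.Chars.isalnum c = true := by
  simp [PySem.Chars.isalnum, h]

-- once the flag is set, the loop just appends every alnum char to the suffix
theorem foldl_stepA_seen (cs : List Char) (pre suf : List Char) :
    cs.foldl pvStepA (pre, suf, true) = (pre, suf ++ cs.filter PySem.Chars.isalnum, true) := by
  induction cs generalizing suf with
  | nil => simp
  | cons c cs ih =>
    by_cases ha : PySem.Chars.isalnum c = true
    · simp [pvStepA, ha, ih, List.filter_cons]
    · have hd : PySem.Chars.isdigit c = false := by
        cases h : PySem.Chars.isdigit c
        · rfl
        · exact absurd (isalnum_of_isdigit h) ha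
      simp [pvStepA, hd, ha, ih, List.filter_cons]

-- the loop from a clear flag computes the takeWhile/dropWhile split of the alnum-filtered list
theorem foldl_stepA_main (cs : List Char) (pre suf : List Char) :
    cs.foldl pvStepA (pre, suf, false) =
      (pre ++ (cs.filter PySem.Chars.isalnum).takeWhile PySem.Chars.isdigit,
       suf ++ (cs.filter PySem.Chars.isalnum).dropWhile PySem.Chars.isdigit,
       !((cs.filter PySem.Chars.isalnum).all PySem.Chars.isdigit)) := by
  induction cs generalizing pre suf with
  | nil => simp
  | cons c cs ih =>
    by_cases hd : PySem.Chars.isdigit c = true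
    · have ha := isalnum_of_isdigit hd
      simp [pvStepA, hd, ha, ih, List.filter_cons, List.takeWhile_cons, List.dropWhile_cons]
    · by_cases ha : PySem.Chars.isalnum c = true
      · have hstep : pvStepA (pre, suf, false) c = (pre, suf ++ [c], true) := by
          simp [pvStepA, hd, ha]
        rw [List.foldl_cons, hstep, foldl_stepA_seen]
        simp [List.filter_cons, ha, List.takeWhile_cons, List.dropWhile_cons, hd]
      · simp [pvStepA, hd, ha, ih, List.filter_cons]

theorem drop_length_takeWhile (p : Char → Bool) (l : List Char) :
    l.drop (l.takeWhile p).length = l.dropWhile p := by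
  induction l with
  | nil => rfl
  | cons c cs ih =>
    by_cases h : p c = true
    · simpa [List.takeWhile_cons, List.dropWhile_cons, h] using ih
    · simp [List.takeWhile_cons, List.dropWhile_cons, h]

-- A's loop-and-guard body equals B's filter/takewhile body on every char list
theorem body_eq (cs : List Char) : pvBodyA cs = pvBodyB cs := by
  unfold pvBodyA pvBodyB
  rw [foldl_stepA_main]
  simp only [List.nil_append]
  set cl := cs.filter PySem.Chars.isalnum with hcl
  have hsplit : cl.takeWhile PySem.Chars.isdigit ++ cl.dropWhile PySem.Chars.isdigit = cl :=
    List.takeWhile_append_dropWhile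
  by_cases hc : cl = []
  · simp [hc]
  · have hguard : ¬ (cl.takeWhile PySem.Chars.isdigit = [] ∧ cl.dropWhile PySem.Chars.isdigit = []) := by
      intro h
      exact hc (by rw [← hsplit, h.1, h.2]; rfl)
    rw [if_neg hguard, if_neg hc, drop_length_takeWhile]
    rfl

-- ===== VERDICT (by name: the statement is the Claim_ definition above) =====
theorem normalize_collector_number_spec : Claim_equal_normalize_collector_number := by
  intro value _
  unfold Spec_normalize_collector_number
  cases value with
  | none => rfl
  | some v =>
    simp only [normalize_collector_number, normalize_collector_number_alt]
    by_cases hv : v = ""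
    · rw [if_pos hv, if_pos hv]
    rw [if_neg hv, if_neg hv]
    by_cases ht : PySem.Str.replace (PySem.Str.lower (PySem.Str.strip v)) " " "" = ""
    · rw [if_pos ht, ht]
      rfl
    · rw [if_neg ht, body_eq]
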